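-- pv_equiv track=rewrite | github.com/mortyc126-debug/SHA | step0_exact_algebra.py | mini_sha
-- ===== SOURCE A (Python) =====
-- N = 4  # word size in bits
--
-- MASK = (1 << N) - 1  # 0xF for n=4
--
-- def rotr(x, r):
--     """Rotate right by r positions in n-bit word."""
--     return ((x >> r) | (x << (N - r))) & MASK
--
-- def ch(e, f, g):
--     return (e & f) ^ (~e & g) & MASK
--
-- def maj(a, b, c):
--     return (a & b) ^ (a & c) ^ (b & c)
--
-- def sigma0(x):
--     """Σ₀ for mini-SHA: ROTR(1) ⊕ ROTR(2) ⊕ ROTR(3)"""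
--     return rotr(x, 1) ^ rotr(x, 2) ^ rotr(x, 3)
--
-- def sigma1(x):
--     """Σ₁ for mini-SHA: ROTR(1) ⊕ ROTR(2) ⊕ ROTR(3) — same for now"""
--     # Using different shifts to avoid degeneracy
--     return rotr(x, 1) ^ rotr(x, 3) ^ (x >> 1)  # last = SHR, like σ₁
--
-- def add(a, b):
--     """Addition mod 2^n"""
--     return (a + b) & MASK
--
-- IV = [0x6, 0xB, 0x3, 0xA, 0x5, 0x9, 0x1, 0xF]  # 8 registers
--
-- K = [0x4, 0x2, 0xB, 0x7, 0xA, 0x3, 0xE, 0x5,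
--      0x9, 0x1, 0xD, 0x6, 0x0, 0x8, 0xC, 0xF]
--
-- def mini_sha(msg_words, R):
--     """
--     Mini-SHA compress function.
--     msg_words: list of 4 words (each n bits)
--     R: number of rounds
--     Returns: (a, e) after R rounds — 2*n = 8 output bits
--     """
--     assert len(msg_words) == 4
--
--     # Schedule: W[0..3] = message, W[4..R-1] = 0 (simplest)
--     W = list(msg_words) + [0] * max(0, R - 4)
--
--     # State
--     a, b, c, d, e, f, g, h = IV[:]
--
--     for r in range(R):
--         w_r = W[r] if r < len(W) else 0
--         k_r = K[r % len(K)]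
--
--         T1 = add(add(add(add(h, sigma1(e)), ch(e, f, g)), k_r), w_r)
--         T2 = add(sigma0(a), maj(a, b, c))
--
--         # Shift
--         h = g
--         g = f
--         f = e
--         e = add(d, T1)
--         d = c
--         c = b
--         b = a
--         a = add(T1, T2)
--
--     return (a, e)
-- ===== SOURCE B (Python) =====
-- N = 4  # word size in bits
--
-- MASK = (1 << N) - 1
--
-- def rotr(x, r):
--     return ((x >> r) | (x << (N - r))) & MASK
--
-- def ch(e, f, g):
--     return (e & f) ^ (~e & g) & MASK
--
-- def maj(a, b, c):
--     return (a & b) ^ (a & c) ^ (b & c)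
--
-- def sigma0(x):
--     return rotr(x, 1) ^ rotr(x, 2) ^ rotr(x, 3)
--
-- def sigma1(x):
--     return rotr(x, 1) ^ rotr(x, 3) ^ (x >> 1)
--
-- def add(a, b):
--     return (a + b) & MASK
--
-- IV = [0x6, 0xB, 0x3, 0xA, 0x5, 0x9, 0x1, 0xF]
--
-- K = [0x4, 0x2, 0xB, 0x7, 0xA, 0x3, 0xE, 0x5,
--      0x9, 0x1, 0xD, 0x6, 0x0, 0x8, 0xC, 0xF]
--
-- def mini_sha(msg_words, R):
--     """Single-chain formulation: the whole e/f/g/h half of the state is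
--     eliminated algebraically.  Writing a_i for the a-chain (a_0..a_3 seeded
--     from IV[3..0]) and T2_i = add(sigma0(a_{i-1}), maj(a_{i-1},a_{i-2},a_{i-3})),
--     the round equations a_i = (T1_i+T2_i) mod 16 and e_i = (a_{i-4}+T1_i) mod 16
--     give e_i = (a_i + a_{i-4} - T2_i) mod 16, so every e-value is a pure
--     function of the a-chain; B keeps only the list of a-values and derives
--     each needed e on the fly."""
--     assert len(msg_words) == 4
--     A = [IV[3], IV[2], IV[1], IV[0]]          # a_0..a_3, index i = a_i
--     ESEED = [IV[7], IV[6], IV[5], IV[4]]      # e_0..e_3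
--
--     def t2(i):
--         return add(sigma0(A[i - 1]), maj(A[i - 1], A[i - 2], A[i - 3]))
--
--     def e(i):
--         return ESEED[i] if i < 4 else (A[i] + A[i - 4] - t2(i)) & MASK
--
--     for r in range(R):
--         w = msg_words[r] if r < 4 else 0
--         k = K[r % len(K)]
--         T1 = add(add(add(add(e(r), sigma1(e(r + 3))), ch(e(r + 3), e(r + 2), e(r + 1))), k), w)
--         A.append(add(T1, t2(r + 4)))
--     return (A[-1], e(len(A) - 1))
-- ===== Notes on version B (the rewrite author's own statement) =====
-- stated objective: alternative
-- what changed: B eliminates the whole e/f/g/h half of the state algebraically: from a_i=(T1_i+T2_i) mod 16 and e_i=(a_{i-4}+T1_i) mod 16 it derives e_i=(a_i+a_{i-4}-T2_i) mod 16, so it maintains only the single a-chain and reconstructs every needed e-value (seeds for i<4) instead of shifting eight registers or keeping a W schedule.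
import Mathlib
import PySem

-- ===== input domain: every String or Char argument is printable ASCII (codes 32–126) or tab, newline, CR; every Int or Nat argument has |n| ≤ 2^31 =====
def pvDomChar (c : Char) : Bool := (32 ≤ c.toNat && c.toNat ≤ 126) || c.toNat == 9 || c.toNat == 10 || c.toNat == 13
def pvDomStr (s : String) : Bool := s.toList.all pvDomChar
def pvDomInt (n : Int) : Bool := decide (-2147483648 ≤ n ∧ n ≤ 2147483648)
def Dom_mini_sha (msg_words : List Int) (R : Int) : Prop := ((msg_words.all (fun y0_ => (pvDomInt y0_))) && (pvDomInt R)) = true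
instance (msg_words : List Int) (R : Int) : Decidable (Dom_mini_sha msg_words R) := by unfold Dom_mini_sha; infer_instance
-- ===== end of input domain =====

-- B eliminates the e/f/g/h half of the state algebraically (e_i = (a_i + a_{i-4} - T2_i) mod 16)
-- and maintains only the single a-chain (alternative formulation, same cost).

-- shared module-level helpers (used verbatim by both A and B)
def pvRotr (x : Int) (r : Nat) : Int :=
  PySem.Int.band (PySem.Int.bor (x >>> r) (x <<< (4 - r))) 15

def pvCh (e f g : Int) : Int :=
  PySem.Int.bxor (PySem.Int.band e f) (PySem.Int.band (PySem.Int.band (Int.not e) g) 15)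

def pvMaj (a b c : Int) : Int :=
  PySem.Int.bxor (PySem.Int.bxor (PySem.Int.band a b) (PySem.Int.band a c)) (PySem.Int.band b c)

def pvSigma0 (x : Int) : Int :=
  PySem.Int.bxor (PySem.Int.bxor (pvRotr x 1) (pvRotr x 2)) (pvRotr x 3)

def pvSigma1 (x : Int) : Int :=
  PySem.Int.bxor (PySem.Int.bxor (pvRotr x 1) (pvRotr x 3)) (x >>> 1)

def pvAdd (a b : Int) : Int := PySem.Int.band (a + b) 15

def pvK : List Int := [4, 2, 11, 7, 10, 3, 14, 5, 9, 1, 13, 6, 0, 8, 12, 15]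

-- ===== PORT A =====
-- A's round step over the 8-register state (a,b,c,d,e,f,g,h)
def pvStepA (W : List Int) (s : Int × Int × Int × Int × Int × Int × Int × Int) (r : Int) :
    Int × Int × Int × Int × Int × Int × Int × Int :=
  let (a, b, c, d, e, f, g, h) := s
  let w_r := if r < PySem.List.len W then PySem.List.pyGetD W r 0 else 0
  let k_r := PySem.List.pyGetD pvK (PySem.Int.mod r (PySem.List.len pvK)) 0
  let T1 := pvAdd (pvAdd (pvAdd (pvAdd h (pvSigma1 e)) (pvCh e f g)) k_r) w_r
  let T2 := pvAdd (pvSigma0 a) (pvMaj a b c)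
  (pvAdd T1 T2, a, b, c, pvAdd d T1, e, f, g)

def mini_sha (msg_words : List Int) (R : Int) : Int × Int :=
  -- the assert raises when len(msg_words) ≠ 4: excluded by Pre_mini_sha
  let W := msg_words ++ List.replicate (max 0 (R - 4)).toNat 0
  let s := (PySem.List.pyRange 0 R 1).foldl (pvStepA W) (6, 11, 3, 10, 5, 9, 1, 15)
  (s.1, s.2.2.2.2.1)

-- ===== PORT B =====
-- B's helper t2(i): T2 of the round that produced a_i, read off the a-chain
def pvT2 (A : List Int) (i : Int) : Int :=
  pvAdd (pvSigma0 (PySem.List.pyGetD A (i - 1) 0))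
    (pvMaj (PySem.List.pyGetD A (i - 1) 0) (PySem.List.pyGetD A (i - 2) 0)
      (PySem.List.pyGetD A (i - 3) 0))

-- B's helper e(i): the e-value, reconstructed from the a-chain (seeds for i < 4)
def pvE (A : List Int) (i : Int) : Int :=
  if i < 4 then PySem.List.pyGetD [15, 1, 9, 5] i 0
  else PySem.Int.band (PySem.List.pyGetD A i 0 + PySem.List.pyGetD A (i - 4) 0 - pvT2 A i) 15

-- B's round step: append one word to the single a-chain
def pvStepB (msg_words : List Int) (A : List Int) (r : Int) : List Int :=
  let w := if r < 4 then PySem.List.pyGetD msg_words r 0 else 0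
  let k := PySem.List.pyGetD pvK (PySem.Int.mod r (PySem.List.len pvK)) 0
  let T1 := pvAdd (pvAdd (pvAdd (pvAdd (pvE A r) (pvSigma1 (pvE A (r + 3))))
              (pvCh (pvE A (r + 3)) (pvE A (r + 2)) (pvE A (r + 1)))) k) w
  A ++ [pvAdd T1 (pvT2 A (r + 4))]

def mini_sha_alt (msg_words : List Int) (R : Int) : Int × Int :=
  let A := (PySem.List.pyRange 0 R 1).foldl (pvStepB msg_words) [10, 3, 11, 6]
  (PySem.List.pyGetD A (-1) 0, pvE A (PySem.List.len A - 1))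

-- ===== PRECONDITION & SPEC =====
-- A's assert raises AssertionError unless len(msg_words) == 4
def Pre_mini_sha (msg_words : List Int) (R : Int) : Prop := msg_words.length = 4

instance (msg_words : List Int) (R : Int) : Decidable (Pre_mini_sha msg_words R) := by
  unfold Pre_mini_sha; infer_instance

def pvWitness_mini_sha : List Int × Int := ([1, 2, 3, 4], 8)

def Spec_mini_sha (msg_words : List Int) (R : Int) (out : Int × Int) : Prop := out = mini_sha_alt msg_words R
instance (msg_words : List Int) (R : Int) (out : Int × Int) : Decidable (Spec_mini_sha msg_words R out) := by unfold Spec_mini_sha; infer_instance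

-- ===== CLAIM (what is proved, stated in full; the proofs are below) =====
def Claim_equal_mini_sha : Prop := ∀ (msg_words : List Int) (R : Int), Dom_mini_sha msg_words R → Pre_mini_sha msg_words R → Spec_mini_sha msg_words R (mini_sha msg_words R)

-- ===== LEMMAS AND PROOFS =====

theorem nat15 (n : Nat) : n &&& 15 = n % 16 := Nat.and_two_pow_sub_one_eq_mod n 4

-- Python's x & 15 is x mod 16, for every integer x
theorem band15 (x : Int) : PySem.Int.band x 15 = x % 16 := by
  unfold PySem.Int.band
  have e : (15 : Int).toNat = 15 := rfl
  rw [e]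
  split
  · rw [if_pos (by norm_num)]
    have := nat15 x.toNat
    omega
  · rw [if_pos (by norm_num)]
    have h3 : 15 &&& (-x - 1).toNat = (-x - 1).toNat &&& 15 := Nat.and_comm _ _
    have h2 := nat15 (-x - 1).toNat
    omega

-- the algebraic inversion at the heart of B: (a_new + d - T2) mod 16 = (d + T1) mod 16
theorem pv_key_arith (T1 T2 d : Int) :
    PySem.Int.band (pvAdd T1 T2 + d - T2) 15 = pvAdd d T1 := by
  simp only [pvAdd, band15]
  omega

theorem pvGetD1 {a : Type} (x0 x1 : a) (t : List a) (d : a) : PySem.List.pyGetD (x0::x1::t) 1 d = x1 := by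
  rw [show (1:Int) = ((1:Nat):Int) by norm_num, PySem.List.pyGetD_natCast]; rfl

theorem pvGetD2 {a : Type} (x0 x1 x2 : a) (t : List a) (d : a) : PySem.List.pyGetD (x0::x1::x2::t) 2 d = x2 := by
  rw [show (2:Int) = ((2:Nat):Int) by norm_num, PySem.List.pyGetD_natCast]; rfl

theorem pvGetD3 {a : Type} (x0 x1 x2 x3 : a) (t : List a) (d : a) : PySem.List.pyGetD (x0::x1::x2::x3::t) 3 d = x3 := by
  rw [show (3:Int) = ((3:Nat):Int) by norm_num, PySem.List.pyGetD_natCast]; rfl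

-- the two per-round message words agree while 0 <= r < R, given len(msg) = 4
theorem pv_w_eq (msg : List Int) (h4 : msg.length = 4) (R r : Int) (h0 : 0 ≤ r) (hr : r < R) :
    (if r < PySem.List.len (msg ++ List.replicate (max 0 (R - 4)).toNat 0) then
        PySem.List.pyGetD (msg ++ List.replicate (max 0 (R - 4)).toNat 0) r 0 else 0)
      = (if r < 4 then PySem.List.pyGetD msg r 0 else 0) := by
  obtain ⟨m0, m1, m2, m3, rfl⟩ : ∃ m0 m1 m2 m3, msg = [m0, m1, m2, m3] := by
    match msg, h4 with | [m0, m1, m2, m3], _ => exact ⟨m0, m1, m2, m3, rfl⟩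
  have hlt : r < PySem.List.len ([m0, m1, m2, m3] ++ List.replicate (max 0 (R - 4)).toNat 0) := by
    simp [PySem.List.len_eq]; omega
  rw [if_pos hlt]
  by_cases hc : r < 4
  · rw [if_pos hc]
    interval_cases r <;> simp [pvGetD1, pvGetD2, pvGetD3]
  · rw [if_neg hc]
    have hk : r = ((4 + (r - 4).toNat : Nat) : Int) := by push_cast; omega
    rw [hk, PySem.List.pyGetD_natCast]
    rw [List.getD_eq_getElem?_getD, List.getElem?_append_right (by simp)]
    simp [List.getElem?_replicate]
    split <;> rfl

-- Python's xs[-1] on a list ending in a known word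
theorem pvNegD1 {a : Type} (l : List a) (x3 x2 x1 x0 d : a) : PySem.List.pyGetD (l ++ [x3, x2, x1, x0]) (-1) d = x0 := by
  rw [PySem.List.pyGetD_neg_ofNat _ 1 d (by omega) (by simp)]
  simp [List.getElem_append_right]

-- a nonnegative in-range index is unaffected by appending on the right
theorem pv_getD_append_left (l l' : List Int) (j : Nat) (d : Int) (hj : j < l.length) :
    PySem.List.pyGetD (l ++ l') (j : Int) d = PySem.List.pyGetD l (j : Int) d := by
  rw [PySem.List.pyGetD_natCast, PySem.List.pyGetD_natCast,
    List.getD_eq_getElem?_getD, List.getD_eq_getElem?_getD, List.getElem?_append_left hj]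

-- reading position (len t + k) of t ++ l lands in l
theorem pv_getD_len_add (t l : List Int) (k : Nat) (d : Int) (_hk : k < l.length) :
    PySem.List.pyGetD (t ++ l) ((t.length + k : Nat) : Int) d = l.getD k d := by
  rw [PySem.List.pyGetD_natCast, List.getD_eq_getElem?_getD,
    List.getElem?_append_right (Nat.le_add_right _ _), Nat.add_sub_cancel_left,
    ← List.getD_eq_getElem?_getD]

-- t2 of the most recent round, read off a chain ending in [d, c, b, a]
theorem pvT2_tail (t : List Int) (dd c b a : Int) :
    pvT2 (t ++ [dd, c, b, a]) ((t.length : Int) + 4) = pvAdd (pvSigma0 a) (pvMaj a b c) := by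
  unfold pvT2
  rw [show (t.length : Int) + 4 - 1 = ((t.length + 3 : Nat) : Int) by push_cast; ring,
      show (t.length : Int) + 4 - 2 = ((t.length + 2 : Nat) : Int) by push_cast; ring,
      show (t.length : Int) + 4 - 3 = ((t.length + 1 : Nat) : Int) by push_cast; ring,
      pv_getD_len_add _ _ _ _ (by simp), pv_getD_len_add _ _ _ _ (by simp),
      pv_getD_len_add _ _ _ _ (by simp)]
  rfl

-- t2 at an index (>= 4, as B only ever uses it) whose reads all predate the appended word
theorem pvT2_append (B : List Int) (x : Int) (i : Nat) (h4i : 4 ≤ i) (h : i ≤ B.length) :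
    pvT2 (B ++ [x]) (i : Int) = pvT2 B (i : Int) := by
  unfold pvT2
  rw [show (i : Int) - 1 = ((i - 1 : Nat) : Int) by omega,
      show (i : Int) - 2 = ((i - 2 : Nat) : Int) by omega,
      show (i : Int) - 3 = ((i - 3 : Nat) : Int) by omega,
      pv_getD_append_left _ _ _ _ (by omega), pv_getD_append_left _ _ _ _ (by omega),
      pv_getD_append_left _ _ _ _ (by omega)]

-- e(i) is unaffected by appending a later word
theorem pvE_append (B : List Int) (x : Int) (i : Nat) (h : i < B.length) :
    pvE (B ++ [x]) (i : Int) = pvE B (i : Int) := by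
  unfold pvE
  by_cases hc : (i : Int) < 4
  · rw [if_pos hc, if_pos hc]
  · rw [if_neg hc, if_neg hc,
        show (i : Int) - 4 = ((i - 4 : Nat) : Int) by push_cast [show 4 ≤ i by omega]; ring,
        pv_getD_append_left _ _ _ _ h, pv_getD_append_left _ _ _ _ (by omega),
        pvT2_append _ _ _ (by omega) (by omega)]

-- e at the freshly appended position, via the algebraic inversion
theorem pvE_last (t : List Int) (dd c b a T1 : Int) :
    pvE (t ++ [dd, c, b, a] ++ [pvAdd T1 (pvAdd (pvSigma0 a) (pvMaj a b c))])
        ((t.length : Int) + 4)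
      = pvAdd dd T1 := by
  unfold pvE
  rw [if_neg (by omega)]
  have hL : t ++ [dd, c, b, a] ++ [pvAdd T1 (pvAdd (pvSigma0 a) (pvMaj a b c))]
      = t ++ [dd, c, b, a, pvAdd T1 (pvAdd (pvSigma0 a) (pvMaj a b c))] := by simp
  rw [show (t.length : Int) + 4 = ((t.length + 4 : Nat) : Int) by push_cast; ring]
  have hT2 : pvT2 (t ++ [dd, c, b, a] ++ [pvAdd T1 (pvAdd (pvSigma0 a) (pvMaj a b c))])
      ((t.length + 4 : Nat) : Int) = pvAdd (pvSigma0 a) (pvMaj a b c) := by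
    rw [pvT2_append _ _ _ (by omega) (by simp),
        show ((t.length + 4 : Nat) : Int) = (t.length : Int) + 4 by push_cast; ring, pvT2_tail]
  rw [hT2, hL, pv_getD_len_add _ _ _ _ (by simp),
      show ((t.length + 4 : Nat) : Int) - 4 = ((t.length + 0 : Nat) : Int) by push_cast; ring,
      pv_getD_len_add _ _ _ _ (by simp)]
  simpa using pv_key_arith T1 (pvAdd (pvSigma0 a) (pvMaj a b c)) dd

-- invariant: B's a-chain ends in A's four a-registers, and A's e,f,g,h are the
-- reconstructed e-values of the chain at indices n+3, n+2, n+1, n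
theorem pv_loop_rel (msg : List Int) (h4 : msg.length = 4) (R : Int) : ∀ n : Nat, (n : Int) ≤ R →
    ∃ t : List Int,
      t.length = n ∧
      (let s := (PySem.List.pyRange 0 (n : Int) 1).foldl
          (pvStepA (msg ++ List.replicate (max 0 (R - 4)).toNat 0)) (6, 11, 3, 10, 5, 9, 1, 15)
       let B := (PySem.List.pyRange 0 (n : Int) 1).foldl (pvStepB msg) [10, 3, 11, 6]
       B = t ++ [s.2.2.2.1, s.2.2.1, s.2.1, s.1] ∧
       s.2.2.2.2.1 = pvE B ((n : Int) + 3) ∧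
       s.2.2.2.2.2.1 = pvE B ((n : Int) + 2) ∧
       s.2.2.2.2.2.2.1 = pvE B ((n : Int) + 1) ∧
       s.2.2.2.2.2.2.2 = pvE B (n : Int)) := by
  intro n
  induction n with
  | zero =>
    intro _
    refine ⟨[], rfl, ?_⟩
    rw [show ((0 : Nat) : Int) = 0 by norm_num, PySem.List.pyRange_one_eq_nil le_rfl]
    simp only [List.foldl_nil]
    refine ⟨rfl, ?_, ?_, ?_, ?_⟩ <;> decide
  | succ n ih =>
    intro hle
    have hle' : (n : Int) ≤ R := by push_cast at hle ⊢; omega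
    obtain ⟨t, ht, heq, he, hf, hg, hh⟩ := ih hle'
    have hcast : ((n + 1 : Nat) : Int) = (n : Int) + 1 := by push_cast; ring
    rw [hcast, PySem.List.pyRange_one_succ_right (by positivity), List.foldl_append,
        List.foldl_append]
    set s := (PySem.List.pyRange 0 (n : Int) 1).foldl
        (pvStepA (msg ++ List.replicate (max 0 (R - 4)).toNat 0)) (6, 11, 3, 10, 5, 9, 1, 15) with hs
    set B := (PySem.List.pyRange 0 (n : Int) 1).foldl (pvStepB msg) [10, 3, 11, 6] with hB
    clear_value s B
    obtain ⟨a, b, c, d, e, f, g, h⟩ := s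
    simp only at heq he hf hg hh
    subst heq
    have hBlen : (t ++ [d, c, b, a]).length = n + 4 := by simp [ht]
    refine ⟨t ++ [d], by simp [ht], ?_⟩
    simp only [List.foldl_cons, List.foldl_nil, pvStepA, pvStepB]
    rw [pv_w_eq msg h4 R (n : Int) (by positivity) (by push_cast at hle; omega)]
    rw [← he, ← hf, ← hg, ← hh]
    rw [show (n : Int) + 4 = ((t ++ [d, c, b, a]).length : Int) by omega]
    rw [show ((t ++ [d, c, b, a]).length : Int) = (t.length : Int) + 4 by simp [ht]]
    rw [pvT2_tail]
    set w := (if (n : Int) < 4 then PySem.List.pyGetD msg (n : Int) 0 else 0) with hw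
    set k := PySem.List.pyGetD pvK (PySem.Int.mod (n : Int) (PySem.List.len pvK)) 0 with hk
    set T1 := pvAdd (pvAdd (pvAdd (pvAdd h (pvSigma1 e)) (pvCh e f g)) k) w with hT1
    set T2 := pvAdd (pvSigma0 a) (pvMaj a b c) with hT2
    refine ⟨by simp, ?_, ?_, ?_, ?_⟩
    · -- new e-register = reconstructed e at the new last index
      rw [show ((n : Nat) : Int) + 1 + 3 = (t.length : Int) + 4 by omega]
      rw [hT2, pvE_last]
    · -- f' = e
      rw [show ((n : Nat) : Int) + 1 + 2 = (((n + 3 : Nat) : Nat) : Int) by push_cast; ring]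
      rw [pvE_append _ _ _ (by omega), he]
      congr 1
    · -- g' = f
      rw [show ((n : Nat) : Int) + 1 + 1 = (((n + 2 : Nat) : Nat) : Int) by push_cast; ring]
      rw [pvE_append _ _ _ (by omega), hf]
      congr 1
    · -- h' = g
      rw [show ((n : Nat) : Int) + 1 = (((n + 1 : Nat) : Nat) : Int) by push_cast; ring]
      rw [pvE_append _ _ _ (by omega), hg]
      congr 1

-- ===== VERDICT (by name: the statement is the Claim_ definition above) =====
theorem mini_sha_spec : Claim_equal_mini_sha := by
  intro msg R hdom hpre
  unfold Spec_mini_sha mini_sha mini_sha_alt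
  by_cases hR : R ≤ 0
  · rw [PySem.List.pyRange_one_eq_nil hR]
    rfl
  · have hR' : ((R.toNat : Nat) : Int) = R := by omega
    obtain ⟨t, ht, heq, he, _, _, _⟩ := pv_loop_rel msg hpre R R.toNat (by omega)
    rw [show PySem.List.pyRange 0 R 1 = PySem.List.pyRange 0 ((R.toNat : Nat) : Int) 1 from by
      rw [hR']]
    have hlen : ∀ (s0 s1 s2 s3 : Int),
        PySem.List.len (t ++ [s3, s2, s1, s0]) - 1 = ((R.toNat : Nat) : Int) + 3 := by
      intro _ _ _ _
      simp [PySem.List.len_eq]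
      omega
    rw [heq] at he
    simp only [heq, pvNegD1, hlen, ← he]
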